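-- pv_equiv track=rewrite | github.com/pandem2/pandem-source | pandemsource/api.py | __init_row
-- ===== SOURCE A (Python) =====
-- def __init_row(ts_key, columns, date_element, source):
--     """Initialize dictionary's columns and add value if not indicator"""
--     row = {}
--     for col in columns:
--         tuples_keys = list(map(lambda x: x[0], ts_key))
--         tuples_values = list(map(lambda x: x[1], ts_key))
--         if col in tuples_keys:
--             row[col] = tuples_values[tuples_keys.index(col)]
--         else:
--             row[col] = None
--     row[date_element[0]] = date_element[1]
--     row['source'] = source
--     return row
-- ===== SOURCE B (Python) =====
-- def __init_row(ts_key, columns, date_element, source):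
--     """Initialize dictionary's columns and add value if not indicator"""
--     row = {col: None for col in columns}
--     wanted = set(columns)
--     seen = set()
--     for k, v in ts_key:
--         if k in wanted and k not in seen:
--             row[k] = v
--             seen.add(k)
--     row[date_element[0]] = date_element[1]
--     row['source'] = source
--     return row
-- ===== Notes on version B (the rewrite author's own statement) =====
-- stated objective: faster
-- what changed: Instead of rebuilding the key and value lists of ts_key and scanning them (in/index) for every column, B pre-fills all columns with None and makes a single pass over ts_key with a seen-set so the first occurrence of each wanted key wins.
import Mathlib
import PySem

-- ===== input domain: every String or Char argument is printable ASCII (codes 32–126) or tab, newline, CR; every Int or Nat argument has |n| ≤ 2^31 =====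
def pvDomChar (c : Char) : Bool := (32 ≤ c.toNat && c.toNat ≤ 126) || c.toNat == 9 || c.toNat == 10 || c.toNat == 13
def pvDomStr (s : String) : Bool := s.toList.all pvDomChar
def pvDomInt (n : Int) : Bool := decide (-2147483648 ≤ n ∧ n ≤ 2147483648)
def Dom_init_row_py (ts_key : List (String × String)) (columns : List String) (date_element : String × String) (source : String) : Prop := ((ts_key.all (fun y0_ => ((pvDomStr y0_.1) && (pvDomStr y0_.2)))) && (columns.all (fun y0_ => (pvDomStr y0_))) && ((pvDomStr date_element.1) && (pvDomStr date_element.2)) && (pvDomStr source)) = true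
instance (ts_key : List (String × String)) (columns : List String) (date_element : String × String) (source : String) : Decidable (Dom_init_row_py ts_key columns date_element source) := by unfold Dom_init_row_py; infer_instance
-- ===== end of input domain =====

-- B replaces A's per-column rebuild-and-scan of ts_key by a None-prefilled dict and ONE pass
-- over ts_key with a seen-set (first occurrence wins); objective: faster.

-- ===== PORT A =====
def init_row_py (ts_key : List (String × String)) (columns : List String) (date_element : String × String) (source : String) : List (String × Option String) :=
  let row : PySem.Dict String (Option String) :=
    columns.foldl (fun row col =>
      let tuples_keys := ts_key.map (fun x => x.1)
      let tuples_values := ts_key.map (fun x => x.2)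
      if tuples_keys.contains col then
        row.insert col ((PySem.List.index? tuples_keys col).bind
          (fun i => PySem.List.pyGet? tuples_values (i : Int)))
      else
        row.insert col none) PySem.Dict.empty
  let row := row.insert date_element.1 (some date_element.2)
  let row := row.insert "source" (some source)
  row.items

-- ===== PORT B =====
def init_row_py_alt (ts_key : List (String × String)) (columns : List String) (date_element : String × String) (source : String) : List (String × Option String) :=
  let row : PySem.Dict String (Option String) :=
    columns.foldl (fun d col => d.insert col none) PySem.Dict.empty
  let wanted := PySem.Set.ofList columns
  let rs := ts_key.foldl
    (fun (st : PySem.Dict String (Option String) × PySem.Set String) kv =>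
      if wanted.contains kv.1 && !st.2.contains kv.1 then
        (st.1.insert kv.1 (some kv.2), st.2.add kv.1)
      else st)
    (row, PySem.Set.ofList [])
  let row := rs.1
  let row := row.insert date_element.1 (some date_element.2)
  let row := row.insert "source" (some source)
  row.items

-- ===== PRECONDITION & SPEC =====
def Spec_init_row_py (ts_key : List (String × String)) (columns : List String) (date_element : String × String) (source : String) (out : List (String × Option String)) : Prop := out = init_row_py_alt ts_key columns date_element source
instance (ts_key : List (String × String)) (columns : List String) (date_element : String × String) (source : String) (out : List (String × Option String)) : Decidable (Spec_init_row_py ts_key columns date_element source out) := by unfold Spec_init_row_py; infer_instance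

-- ===== CLAIM (what is proved, stated in full; the proofs are below) =====
def Claim_equal_init_row_py : Prop := ∀ (ts_key : List (String × String)) (columns : List String) (date_element : String × String) (source : String), Dom_init_row_py ts_key columns date_element source → Spec_init_row_py ts_key columns date_element source (init_row_py ts_key columns date_element source)

-- ===== LEMMAS AND PROOFS =====

-- B's loop step, named for the proofs
def pvStep (wanted : PySem.Set String)
    (st : PySem.Dict String (Option String) × PySem.Set String) (kv : String × String) :
    PySem.Dict String (Option String) × PySem.Set String :=
  if wanted.contains kv.1 && !st.2.contains kv.1 then
    (st.1.insert kv.1 (some kv.2), st.2.add kv.1)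
  else st

lemma contains_add_eq (s : PySem.Set String) (x y : String) :
    (s.add x).contains y = (s.contains y || y == x) := by
  rw [Bool.eq_iff_iff]
  simp [PySem.Set.mem_add]

-- a foldl of inserts whose value depends only on the key: last write wins, all writes equal
lemma getD_foldl_insert_fun (g : String → Option String) :
    ∀ (l : List String) (d : PySem.Dict String (Option String)) (c : String) (x : Option String),
      (l.foldl (fun d col => d.insert col (g col)) d).getD c x
        = if l.contains c then g c else d.getD c x := by
  intro l
  induction l with
  | nil => intro d c x; simp
  | cons a l ih =>
    intro d c x
    by_cases h : c = a
    · subst h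
      simp [List.foldl_cons, ih, PySem.Dict.getD_insert_self]
    · simp [List.foldl_cons, ih, PySem.Dict.getD_insert_of_ne _ _ _ h, h]

lemma idx_bind (c : String) :
    ∀ (ts : List (String × String)),
      ((List.idxOf? c (ts.map (fun x => x.1))).bind (fun i => (ts.map (fun x => x.2))[i]?))
        = (ts.find? (fun p => p.1 == c)).map (fun p => p.2) := by
  intro ts
  induction ts with
  | nil => simp
  | cons p ts ih =>
    rw [List.map_cons, List.map_cons, List.idxOf?_cons, List.find?_cons]
    by_cases h : p.1 = c
    · simp [h]
    · have hx : (p.1 == c) = false := by simpa using h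
      rw [if_neg (by simp [hx])]
      rcases hidx : List.idxOf? c (ts.map (fun x => x.1)) with _ | i
      · have hnf : List.find? (fun p => p.1 == c) ts = none :=
          List.find?_eq_none.mpr (fun q hq => by
            simp only [beq_iff_eq]
            intro hqc
            exact (List.idxOf?_eq_none_iff.mp hidx)
              (List.mem_map.mpr ⟨q, hq, hqc⟩))
        simp [hx, hnf, hidx]
      · rw [hidx] at ih
        rw [hidx]
        simpa [hx] using ih

-- A's looked-up value is the second component of the first matching pair
lemma index_bind_eq_find (c : String) (ts : List (String × String)) :
      (if (ts.map (fun x => x.1)).contains c then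
        ((PySem.List.index? (ts.map (fun x => x.1)) c).bind
          (fun i => PySem.List.pyGet? (ts.map (fun x => x.2)) (i : Int)))
       else none)
      = (ts.find? (fun p => p.1 == c)).map (fun p => p.2) := by
  by_cases hc : (ts.map (fun x => x.1)).contains c = true
  · rw [if_pos hc]
    have : PySem.List.index? (ts.map (fun x => x.1)) c
        = List.idxOf? c (ts.map (fun x => x.1)) := rfl
    rw [this]
    simp only [PySem.List.pyGet?_natCast]
    exact idx_bind c ts
  · rw [if_neg hc]
    symm
    rw [Option.map_eq_none_iff, List.find?_eq_none]
    intro p hp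
    simp only [List.contains_iff_mem] at hc
    intro hpc
    exact absurd (List.mem_map.mpr ⟨p, hp, by simpa using hpc⟩) (by simpa using hc)

-- B's pass over ts_key: value of the first matching unseen wanted pair, else untouched
lemma getD_foldl_pvStep (wanted : PySem.Set String) :
    ∀ (l : List (String × String)) (d : PySem.Dict String (Option String))
      (seen : PySem.Set String) (c : String) (x : Option String),
      ((l.foldl (pvStep wanted) (d, seen)).1).getD c x
        = if wanted.contains c && !seen.contains c then
            (match l.find? (fun p => p.1 == c) with
             | some p => some p.2
             | none => d.getD c x)
          else d.getD c x := by
  intro l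
  induction l with
  | nil => intro d seen c x; simp
  | cons kv l ih =>
    intro d seen c x
    rw [List.foldl_cons]
    by_cases hcond : (wanted.contains kv.1 && !seen.contains kv.1) = true
    · have hw : kv.1 ∈ wanted :=
        (PySem.Set.contains_iff _ _).mp (Bool.and_elim_left hcond)
      have hs : kv.1 ∉ seen := by
        rw [← PySem.Set.contains_iff]
        simpa using Bool.and_elim_right hcond
      rw [show pvStep wanted (d, seen) kv
          = (d.insert kv.1 (some kv.2), seen.add kv.1) by
            dsimp only [pvStep]; rw [if_pos hcond]]
      rw [ih]
      by_cases h : c = kv.1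
      · subst h
        rw [contains_add_eq]
        simp only [BEq.rfl, Bool.or_true, Bool.not_true, Bool.and_false,
          Bool.false_eq_true, if_false, PySem.Dict.getD_insert_self, hcond, if_true,
          List.find?_cons, BEq.rfl]
      · have hcne : (kv.1 == c) = false := by simpa using Ne.symm h
        rw [contains_add_eq, PySem.Dict.getD_insert_of_ne _ _ _ h,
          List.find?_cons, hcne]
        simp [h]
    · rw [show pvStep wanted (d, seen) kv = (d, seen) by
            dsimp only [pvStep]; rw [if_neg hcond]]
      rw [ih]
      by_cases h : c = kv.1
      · subst h
        rw [if_neg hcond, if_neg hcond]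
      · have hcne : (kv.1 == c) = false := by simpa using Ne.symm h
        rw [List.find?_cons, hcne]

-- B's pass never adds a key: all inserted keys are wanted, hence already present
lemma keys_foldl_pvStep (wanted : PySem.Set String) :
    ∀ (l : List (String × String)) (d : PySem.Dict String (Option String))
      (seen : PySem.Set String),
      (∀ k, wanted.contains k = true → d.contains k = true) →
      ((l.foldl (pvStep wanted) (d, seen)).1).keys = d.keys := by
  intro l
  induction l with
  | nil => intro d seen _; rfl
  | cons kv l ih =>
    intro d seen hd
    rw [List.foldl_cons]
    by_cases hcond : (wanted.contains kv.1 && !seen.contains kv.1) = true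
    · rw [show pvStep wanted (d, seen) kv
          = (d.insert kv.1 (some kv.2), seen.add kv.1) by
            dsimp only [pvStep]; rw [if_pos hcond]]
      rw [ih _ _ (fun k hk => by
        rw [PySem.Dict.contains_insert]
        simp [hd k hk])]
      exact PySem.Dict.keys_insert_of_contains d _
        (hd kv.1 (by simpa using And.left (by simpa using hcond)))
    · rw [show pvStep wanted (d, seen) kv = (d, seen) by
            dsimp only [pvStep]; rw [if_neg hcond]]
      exact ih _ _ hd

-- ===== VERDICT (by name: the statement is the Claim_ definition above) =====
theorem init_row_py_spec : Claim_equal_init_row_py := by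
  intro ts_key columns date_element source _
  unfold Spec_init_row_py init_row_py init_row_py_alt
  -- reduce to equality of the two dicts before the final two inserts
  suffices h : (columns.foldl (fun row col =>
      let tuples_keys := ts_key.map (fun x => x.1)
      let tuples_values := ts_key.map (fun x => x.2)
      if tuples_keys.contains col then
        row.insert col ((PySem.List.index? tuples_keys col).bind
          (fun i => PySem.List.pyGet? tuples_values (i : Int)))
      else
        row.insert col none) PySem.Dict.empty)
    = (ts_key.foldl (pvStep (PySem.Set.ofList columns))
        (columns.foldl (fun d col => d.insert col none) PySem.Dict.empty,
         PySem.Set.ofList [])).1 by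
    rw [h]
    rfl
  -- both sides as a single insert-per-column fold with a value function
  have hA : (columns.foldl (fun row col =>
      let tuples_keys := ts_key.map (fun x => x.1)
      let tuples_values := ts_key.map (fun x => x.2)
      if tuples_keys.contains col then
        row.insert col ((PySem.List.index? tuples_keys col).bind
          (fun i => PySem.List.pyGet? tuples_values (i : Int)))
      else
        row.insert col none) (PySem.Dict.empty : PySem.Dict String (Option String)))
    = columns.foldl (fun d col => d.insert col
        (if (ts_key.map (fun x => x.1)).contains col then
          ((PySem.List.index? (ts_key.map (fun x => x.1)) col).bind
            (fun i => PySem.List.pyGet? (ts_key.map (fun x => x.2)) (i : Int)))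
         else none)) PySem.Dict.empty := by
    apply List.foldl_ext
    intro d col _
    by_cases h : (ts_key.map (fun x => x.1)).contains col = true
    · rw [if_pos h, if_pos h]
    · rw [if_neg h, if_neg h]
  rw [hA]
  -- keys of both sides
  have hkA := PySem.Dict.keys_foldl_insert columns
    (fun _ col => (if (ts_key.map (fun x => x.1)).contains col then
          ((PySem.List.index? (ts_key.map (fun x => x.1)) col).bind
            (fun i => PySem.List.pyGet? (ts_key.map (fun x => x.2)) (i : Int)))
         else none)) PySem.Dict.empty
  have hk0 := PySem.Dict.keys_foldl_insert columns
    (fun _ _ => (none : Option String)) PySem.Dict.empty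
  have hmem0 : ∀ k, (PySem.Set.ofList columns).contains k = true →
      (columns.foldl (fun d col => d.insert col none)
        (PySem.Dict.empty : PySem.Dict String (Option String))).contains k = true := by
    intro k hk
    have hk' : k ∈ columns := (PySem.Set.mem_ofList _ _).mp ((PySem.Set.contains_iff _ _).mp hk)
    rw [PySem.Dict.contains_iff_mem_keys, hk0, PySem.Dict.keys_empty]
    exact (PySem.Set.mem_update _ _ _).mpr (Or.inr hk')
  have hkB := keys_foldl_pvStep (PySem.Set.ofList columns) ts_key _ (PySem.Set.ofList []) hmem0
  -- nodup keys
  have hndA := PySem.Dict.nodup_keys_foldl_insert columns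
    (fun _ col => (if (ts_key.map (fun x => x.1)).contains col then
          ((PySem.List.index? (ts_key.map (fun x => x.1)) col).bind
            (fun i => PySem.List.pyGet? (ts_key.map (fun x => x.2)) (i : Int)))
         else none)) PySem.Dict.empty (by simp [PySem.Dict.keys_empty])
  have hnd0 := PySem.Dict.nodup_keys_foldl_insert columns
    (fun _ _ => (none : Option String)) PySem.Dict.empty (by simp [PySem.Dict.keys_empty])
  -- extensional equality
  apply PySem.Dict.ext
  rw [PySem.Dict.items_eq_map_keys _ hndA none,
      PySem.Dict.items_eq_map_keys _ (by rw [hkB]; exact hnd0) none]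
  rw [hkB, hk0, hkA]
  apply List.map_congr_left
  intro k hkmem
  have hkcol : columns.contains k = true := by
    rw [PySem.Dict.keys_empty] at hkmem
    rcases (PySem.Set.mem_update _ _ _).mp hkmem with h | h
    · cases h
    · simpa [List.contains_iff_mem] using h
  have hwant : (PySem.Set.ofList columns).contains k = true := by
    rw [PySem.Set.contains_iff, PySem.Set.mem_ofList]
    simpa [List.contains_iff_mem] using hkcol
  have hempty : (PySem.Set.ofList ([] : List String)).contains k = false := rfl
  congr 1
  rw [getD_foldl_insert_fun _ columns PySem.Dict.empty k none,
      getD_foldl_pvStep (PySem.Set.ofList columns) ts_key _ (PySem.Set.ofList []) k none,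
      getD_foldl_insert_fun _ columns PySem.Dict.empty k none]
  rw [if_pos hkcol, if_pos hkcol]
  rw [hwant]
  simp only [hempty, Bool.not_false, Bool.and_true]
  rw [index_bind_eq_find k ts_key]
  rcases hf : ts_key.find? (fun p => p.1 == k) with _ | p <;> simp [hf]
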